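-- pv_equiv track=rewrite | github.com/alexmaks8/ylab-course | l2-task2.py | new_field
-- ===== SOURCE A (Python) =====
-- from itertools import count as count_from
--
-- def new_field(ver: int = 10, hor: int = 10) -> tuple:
--     # создаем новое поле
--     count = count_from(1)
--     field, point_dict = [], {}
--
--     for i in range(ver):
--         field.append([])
--         for j in range(hor):
--             number = str(next(count))
--             field[i].append(number)
--             point_dict[number] = (i, j)
--
--     return field, point_dict
-- ===== SOURCE B (Python) =====
-- def new_field(ver: int = 10, hor: int = 10) -> tuple:
--     # flat 1-D construction: number every cell 0..rows*cols-1 once, then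
--     # slice the flat list into rows and recover coordinates with divmod
--     rows, cols = max(ver, 0), max(hor, 0)
--     nums = [str(n + 1) for n in range(rows * cols)]
--     field = [nums[r * cols:(r + 1) * cols] for r in range(rows)]
--     point_dict = {num: divmod(k, cols) for k, num in enumerate(nums)}
--     return field, point_dict
-- ===== Notes on version B (the rewrite author's own statement) =====
-- stated objective: alternative
-- what changed: Replaces A's nested row/column loops threading an itertools counter with a flat 1-D construction: one flat list of cell labels for range(rows*cols), the grid obtained by slicing that flat list into rows, and the coordinate dict obtained from the flat index by divmod(k, cols).
import Mathlib
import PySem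

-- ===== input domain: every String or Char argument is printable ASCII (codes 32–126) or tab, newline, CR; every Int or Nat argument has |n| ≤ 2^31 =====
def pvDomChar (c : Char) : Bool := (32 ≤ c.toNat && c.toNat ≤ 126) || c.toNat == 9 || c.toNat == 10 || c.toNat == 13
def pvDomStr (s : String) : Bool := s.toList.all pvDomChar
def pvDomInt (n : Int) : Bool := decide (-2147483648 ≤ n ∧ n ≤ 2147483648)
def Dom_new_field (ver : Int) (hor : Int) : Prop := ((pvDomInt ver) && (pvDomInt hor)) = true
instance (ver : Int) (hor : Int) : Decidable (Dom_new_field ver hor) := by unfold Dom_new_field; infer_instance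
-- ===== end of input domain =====

-- B replaces A's nested counter-threaded loops with a flat 1-D construction: a single flat
-- list of labels, rows recovered by slicing it, coordinates recovered by divmod of the flat
-- index (objective: alternative algorithmic decomposition; same asymptotic cost).

-- ===== PORT A =====
-- inner loop body: `number = str(next(count)); field[i].append(number); point_dict[number] = (i, j)`
-- (field[i] is exactly the empty row appended just before the inner loop starts, so the
--  state threads (counter, current row, dict) and the outer step appends the finished row)
def pvStepInnerA (i : Int) (s : Int × List String × PySem.Dict String (Int × Int)) (j : Int) :
    Int × List String × PySem.Dict String (Int × Int) :=
  let number := PySem.Int.toStr s.1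
  (s.1 + 1, s.2.1 ++ [number], s.2.2.insert number (i, j))

def new_field (ver : Int) (hor : Int) : List (List String) × (List (String × Int × Int)) :=
  let st := (PySem.List.pyRange 0 ver 1).foldl
    (fun (st : Int × List (List String) × PySem.Dict String (Int × Int)) i =>
      let inner := (PySem.List.pyRange 0 hor 1).foldl (pvStepInnerA i) (st.1, [], st.2.2)
      (inner.1, st.2.1 ++ [inner.2.1], inner.2.2))
    (1, [], PySem.Dict.empty)
  (st.2.1, st.2.2.items)

-- ===== PORT B =====
-- `divmod(k, cols)` is ported as (floordiv k cols, mod k cols); the dict comprehension's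
-- body only runs when nums is nonempty, i.e. cols > 0, where this is exact.
def new_field_alt (ver : Int) (hor : Int) : List (List String) × (List (String × Int × Int)) :=
  let rows := max ver 0
  let cols := max hor 0
  let nums := (PySem.List.pyRange 0 (rows * cols) 1).map (fun n => PySem.Int.toStr (n + 1))
  let field := (PySem.List.pyRange 0 rows 1).map (fun r =>
    PySem.List.slice nums (some (r * cols)) (some ((r + 1) * cols)))
  let pd := (PySem.List.enumerate nums 0).foldl
    (fun (d : PySem.Dict String (Int × Int)) p =>
      d.insert p.2 (PySem.Int.floordiv p.1 cols, PySem.Int.mod p.1 cols))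
    PySem.Dict.empty
  (field, pd.items)

-- ===== PRECONDITION & SPEC =====
def Spec_new_field (ver : Int) (hor : Int) (out : List (List String) × (List (String × Int × Int))) : Prop := out = new_field_alt ver hor
instance (ver : Int) (hor : Int) (out : List (List String) × (List (String × Int × Int))) : Decidable (Spec_new_field ver hor out) := by unfold Spec_new_field; infer_instance

-- ===== CLAIM (what is proved, stated in full; the proofs are below) =====
def Claim_equal_new_field : Prop := ∀ (ver : Int) (hor : Int), Dom_new_field ver hor → Spec_new_field ver hor (new_field ver hor)

-- ===== LEMMAS AND PROOFS =====

-- canonical view shared by both ports: row i of the grid (counter start c, H = hor.toNat)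
def pvRow (c : Int) (H : Nat) (i : Nat) : List String :=
  (List.range H).map (fun k => PySem.Int.toStr (c + (i * H : Nat) + (k : Nat)))

-- canonical view of the coordinate dict: the same inserts, row by row
def pvDict (c : Int) (H : Nat) (n : Nat) (d : PySem.Dict String (Int × Int)) :
    PySem.Dict String (Int × Int) :=
  (List.range n).foldl (fun d i =>
    (List.range H).foldl (fun d k =>
      d.insert (PySem.Int.toStr (c + (i * H : Nat) + (k : Nat))) ((i : Int), (k : Int))) d) d

lemma pv_innerA (hor i c : Int) (r : List String) (d : PySem.Dict String (Int × Int)) :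
    (PySem.List.pyRange 0 hor 1).foldl (pvStepInnerA i) (c, r, d)
    = (c + (hor.toNat : Int),
       r ++ (List.range hor.toNat).map (fun k => PySem.Int.toStr (c + (k : Nat))),
       (List.range hor.toNat).foldl
         (fun d k => d.insert (PySem.Int.toStr (c + (k : Nat))) (i, (k : Int))) d) := by
  rw [PySem.List.pyRange_one]
  simp only [sub_zero, List.foldl_map, zero_add]
  generalize hor.toNat = n
  induction n with
  | zero => simp
  | succ n ih =>
    simp only [List.range_succ, List.foldl_append, List.map_append]
    rw [ih]
    simp only [List.foldl_cons, List.foldl_nil, pvStepInnerA]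
    refine Prod.ext ?_ (Prod.ext ?_ ?_) <;> simp <;> push_cast <;> try ring

lemma pv_outer_gen (hor : Int) (n : Nat) (c : Int) (F : List (List String))
    (d : PySem.Dict String (Int × Int)) :
    (List.range n).foldl
      (fun (st : Int × List (List String) × PySem.Dict String (Int × Int)) (i' : Nat) =>
        let inner := (PySem.List.pyRange 0 hor 1).foldl (pvStepInnerA (i' : Int)) (st.1, [], st.2.2)
        (inner.1, st.2.1 ++ [inner.2.1], inner.2.2))
      (c, F, d)
    = (c + ((n * hor.toNat : Nat) : Int),
       F ++ (List.range n).map (pvRow c hor.toNat),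
       pvDict c hor.toNat n d) := by
  induction n with
  | zero => simp [pvDict]
  | succ n ih =>
    simp only [List.range_succ, List.foldl_append, List.map_append]
    rw [ih]
    simp only [List.foldl_cons, List.foldl_nil, pv_innerA, pvDict, List.range_succ,
      List.foldl_append]
    refine Prod.ext ?_ (Prod.ext ?_ ?_) <;> simp [pvRow] <;> push_cast <;> try ring

lemma pv_outerA (ver hor : Int) :
    ((PySem.List.pyRange 0 ver 1).foldl
      (fun (st : Int × List (List String) × PySem.Dict String (Int × Int)) i =>
        let inner := (PySem.List.pyRange 0 hor 1).foldl (pvStepInnerA i) (st.1, [], st.2.2)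
        (inner.1, st.2.1 ++ [inner.2.1], inner.2.2))
      (1, [], PySem.Dict.empty))
    = ((1 + ((ver.toNat * hor.toNat : Nat) : Int) : Int),
       (List.range ver.toNat).map (pvRow 1 hor.toNat),
       pvDict 1 hor.toNat ver.toNat PySem.Dict.empty) := by
  rw [PySem.List.pyRange_one 0 ver]
  simp only [sub_zero, List.foldl_map, zero_add]
  simpa using pv_outer_gen hor ver.toNat 1 [] PySem.Dict.empty

-- B side: the flat range splits into rows
lemma pv_range_mul (V H : Nat) :
    List.range (V * H)
    = ((List.range V).map (fun i => (List.range H).map (fun k => i * H + k))).flatten := by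
  induction V with
  | zero => simp
  | succ V ih =>
    rw [Nat.succ_mul, List.range_add, ih, List.range_succ]
    simp

-- slicing row r out of the flattened grid
lemma pv_drop_take_flatten {α : Type} (L : List (List α)) (H : Nat)
    (h : ∀ l ∈ L, l.length = H) (r : Nat) (hr : r < L.length) :
    ((L.flatten).drop (r * H)).take H = L[r] := by
  induction L generalizing r with
  | nil => simp at hr
  | cons x L ih =>
    cases r with
    | zero =>
      have hx : x.length = H := h x (by simp)
      simp [List.flatten_cons, ← hx]
    | succ r =>
      have hx : x.length = H := h x (by simp)
      have hlen : (r + 1) * H = x.length + r * H := by rw [hx]; ring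
      rw [List.flatten_cons, hlen, List.drop_append]
      rw [List.drop_of_length_le (by omega), Nat.add_sub_cancel_left, List.nil_append]
      exact ih (fun l hl => h l (by simp [hl])) r (by simpa using hr)

lemma pv_enum_map_range {α : Type} (f : Nat → α) (n : Nat) (s : Int) :
    PySem.List.enumerate ((List.range n).map f) s
    = (List.range n).map (fun i => (s + (i : Nat), f i)) := by
  induction n with
  | zero => simp [PySem.List.enumerate_nil]
  | succ n ih =>
    simp only [List.range_succ, List.map_append, PySem.List.enumerate_append, ih]
    simp

-- the flat-divmod dict fold equals the canonical nested fold
lemma pv_dict_flat (V H : Nat) (d : PySem.Dict String (Int × Int)) :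
    (List.range (V * H)).foldl
      (fun (d : PySem.Dict String (Int × Int)) m =>
        d.insert (PySem.Int.toStr ((0 : Int) + (m : Nat) + 1))
          (PySem.Int.floordiv (m : Nat) (H : Nat), PySem.Int.mod (m : Nat) (H : Nat))) d
    = pvDict 1 H V d := by
  rw [pv_range_mul, List.foldl_flatten, List.foldl_map, pvDict]
  induction V generalizing d with
  | zero => simp
  | succ V ih =>
    simp only [List.range_succ, List.foldl_append, List.foldl_cons, List.foldl_nil]
    rw [ih]
    rw [List.foldl_map]
    apply PySem.List.foldl_congr_mem
    intro acc k hk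
    have hkH : k < H := List.mem_range.mp hk
    have hH : 0 < H := Nat.lt_of_le_of_lt (Nat.zero_le _) hkH
    have hdiv : (V * H + k) / H = V := by
      rw [Nat.mul_comm V H, Nat.mul_add_div hH, Nat.div_eq_of_lt hkH, Nat.add_zero]
    have hmod : (V * H + k) % H = k := by
      rw [Nat.mul_comm V H, Nat.mul_add_mod, Nat.mod_eq_of_lt hkH]
    rw [PySem.Int.floordiv_natCast, PySem.Int.mod_natCast, hdiv, hmod]
    congr 1
    push_cast
    ring

-- ===== VERDICT (by name: the statement is the Claim_ definition above) =====
theorem new_field_spec : Claim_equal_new_field := by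
  intro ver hor _
  show _ = _
  simp only [new_field, new_field_alt]
  rw [pv_outerA]
  have hmax_v : max ver 0 = ((ver.toNat : Nat) : Int) := (Int.ofNat_toNat ver).symm
  have hmax_h : max hor 0 = ((hor.toNat : Nat) : Int) := (Int.ofNat_toNat hor).symm
  rw [hmax_v, hmax_h]
  set V := ver.toNat
  set H := hor.toNat
  have hprod : ((V : Int)) * ((H : Int)) = ((V * H : Nat) : Int) := by push_cast; ring
  rw [hprod]
  -- nums as a flattened grid of canonical rows
  have hnums : (PySem.List.pyRange 0 ((V * H : Nat) : Int) 1).map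
        (fun n => PySem.Int.toStr (n + 1))
      = ((List.range V).map (pvRow 1 H)).flatten := by
    rw [PySem.List.pyRange_one]
    simp only [sub_zero, Int.toNat_natCast, List.map_map]
    rw [pv_range_mul, List.map_flatten, List.map_map]
    congr 1
    apply List.map_congr_left
    intro i _
    simp only [Function.comp_def, List.map_map, pvRow]
    apply List.map_congr_left
    intro k _
    congr 1
    push_cast
    ring
  dsimp only
  congr 1
  · -- field component
    rw [hnums, PySem.List.pyRange_one]
    simp only [sub_zero, Int.toNat_natCast, List.map_map]
    apply List.map_congr_left
    intro r hr
    have hrV : r < V := List.mem_range.mp hr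
    have h1 : ((0 : Int) + r) * ((H : Nat) : Int) = ((r * H : Nat) : Int) := by push_cast; ring
    have h2 : ((0 : Int) + r + 1) * ((H : Nat) : Int) = ((r * H : Nat) : Int) + ((H : Nat) : Int) := by
      push_cast; ring
    simp only [Function.comp_def, h1, h2]
    rw [PySem.List.slice_natCast_add]
    rw [pv_drop_take_flatten ((List.range V).map (pvRow 1 H)) H
      (by intro l hl; obtain ⟨i, _, rfl⟩ := List.mem_map.mp hl; simp [pvRow])
      r (by simpa using hrV)]
    simp
  · -- dict component
    congr 1
    rw [PySem.List.pyRange_one]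
    simp only [sub_zero, Int.toNat_natCast, List.map_map]
    rw [pv_enum_map_range, List.foldl_map, ← pv_dict_flat V H PySem.Dict.empty]
    apply PySem.List.foldl_congr_mem
    intro acc m _
    simp only [Function.comp_def, zero_add]
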